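-- pv_equiv track=rewrite | github.com/CalthorpeAnalytics/urbanfootprint | footprint/client/configuration/default/config_entity/default_project.py | project_key
-- ===== SOURCE A (Python) =====
-- def project_key(name):
--
--     if len(name) < 7:
--         return name.lower().replace(' ', '_').replace(':', '')
--
--     key_parts = []
--     previous = None
--
--     for l in name.lower():
--         if l not in ['a', 'e', 'i', 'o', 'u', ' ', ':'] and previous != l:
--             key_parts.append(l)
--             previous = l
--
--     return ''.join(key_parts)
-- ===== SOURCE B (Python) =====
-- def project_key(name):
--     if len(name) < 7:
--         return name.lower().replace(' ', '_').replace(':', '')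
--     filtered = [c for c in name.lower() if c not in 'aeiou :']
--     return ''.join(c for p, c in zip([None] + filtered, filtered) if c != p)
-- ===== Notes on version B (the rewrite author's own statement) =====
-- stated objective: idiomatic
-- what changed: Replaces A's single loop with mutable previous-state by a filter comprehension followed by a pairwise zip-with-shifted-list pass that drops consecutive duplicates, exploiting that A's previous pointer always equals the last kept (= last filtered) character.
import Mathlib
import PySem

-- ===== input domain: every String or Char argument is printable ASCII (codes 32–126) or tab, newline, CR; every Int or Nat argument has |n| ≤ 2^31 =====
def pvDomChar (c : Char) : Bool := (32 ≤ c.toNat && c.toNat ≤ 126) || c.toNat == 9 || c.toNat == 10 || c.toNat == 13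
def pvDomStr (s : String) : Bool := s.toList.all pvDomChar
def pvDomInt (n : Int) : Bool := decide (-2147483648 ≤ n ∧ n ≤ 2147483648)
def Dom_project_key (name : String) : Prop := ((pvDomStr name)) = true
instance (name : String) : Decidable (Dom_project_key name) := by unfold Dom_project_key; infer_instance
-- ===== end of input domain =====

-- B re-decomposes A's stateful dedup loop as filter-then-adjacent-pair comparison; same cost, more idiomatic.

-- ===== PORT A =====
def project_key (name : String) : String :=
  if PySem.Str.len name < 7 then
    PySem.Str.replace (PySem.Str.replace (PySem.Str.lower name) " " "_") ":" ""
  else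
    let st := (PySem.Str.lower name).toList.foldl
      (fun (st : List Char × Option Char) l =>
        if !(['a','e','i','o','u',' ',':'].contains l) && st.2 != some l then
          (st.1 ++ [l], some l)
        else st) ([], none)
    String.ofList st.1

-- ===== PORT B =====
def project_key_alt (name : String) : String :=
  if PySem.Str.len name < 7 then
    PySem.Str.replace (PySem.Str.replace (PySem.Str.lower name) " " "_") ":" ""
  else
    let filtered := (PySem.Str.lower name).toList.filter
      (fun c => !("aeiou :".toList.contains c))
    String.ofList (((((none : Option Char) :: filtered.map some).zip filtered).filter
      (fun p => some p.2 != p.1)).map Prod.snd)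

-- ===== PRECONDITION & SPEC =====
def Spec_project_key (name : String) (out : String) : Prop := out = project_key_alt name
instance (name : String) (out : String) : Decidable (Spec_project_key name out) := by unfold Spec_project_key; infer_instance

-- ===== CLAIM (what is proved, stated in full; the proofs are below) =====
def Claim_equal_project_key : Prop := ∀ (name : String), Dom_project_key name → Spec_project_key name (project_key name)

-- ===== LEMMAS AND PROOFS =====

-- adjacent-dedup relative to a previous element (proof-only helper)
def pvDedup : List Char → Option Char → List Char
  | [], _ => []
  | c :: cs, prev => if prev = some c then pvDedup cs prev else c :: pvDedup cs (some c)

theorem pvFoldA (keep : Char → Bool) (cs : List Char) : ∀ (acc : List Char) (prev : Option Char),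
    (cs.foldl
      (fun (st : List Char × Option Char) l =>
        if keep l && st.2 != some l then (st.1 ++ [l], some l) else st) (acc, prev)).1
      = acc ++ pvDedup (cs.filter keep) prev := by
  induction cs with
  | nil => intro acc prev; simp [pvDedup]
  | cons c cs ih =>
    intro acc prev
    rw [List.foldl_cons, List.filter_cons]
    cases hk : keep c with
    | false =>
      rw [if_neg (by simp), if_neg (by simp)]
      exact ih acc prev
    | true =>
      simp only [Bool.true_and, if_true]
      by_cases hp : prev = some c
      · subst hp
        rw [if_neg (by simp), ih]
        simp only [pvDedup, if_true]
      · rw [if_pos (by simp [bne, hp]), ih]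
        simp only [pvDedup]
        rw [if_neg hp, List.append_assoc, List.singleton_append]

theorem pvZipB (l : List Char) : ∀ (prev : Option Char),
    ((((prev :: l.map some).zip l).filter (fun p => some p.2 != p.1)).map Prod.snd)
      = pvDedup l prev := by
  induction l with
  | nil => intro prev; simp [pvDedup]
  | cons c cs ih =>
    intro prev
    simp only [List.map_cons, List.zip_cons_cons, List.filter_cons]
    by_cases hp : prev = some c
    · subst hp
      simp [pvDedup, ih]
    · have hb : (some c != prev) = true := by
        simp [bne]; exact fun h => hp h.symm
      simp [hb, pvDedup, hp, ih]

theorem project_key_eq (name : String) : project_key name = project_key_alt name := by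
  unfold project_key project_key_alt
  split
  · rfl
  · have htl : "aeiou :".toList = ['a','e','i','o','u',' ',':'] := by simp
    simp only [htl]
    rw [pvFoldA (fun l => !(['a','e','i','o','u',' ',':'].contains l)), pvZipB,
      List.nil_append]

-- ===== VERDICT (by name: the statement is the Claim_ definition above) =====
theorem project_key_spec : Claim_equal_project_key :=
  fun name _ => project_key_eq name
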